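-- pv_equiv track=rewrite | github.com/walid192/LeetCode | 2559-count-vowel-strings-in-ranges/2559-count-vowel-strings-in-ranges.py | vowelStrings
-- ===== SOURCE A (Python) =====
-- from typing import List
--
-- def vowelStrings(words: List[str], queries: List[List[int]]) -> List[int]:
--
--     vowels={'a','e','i','u','o'}
--     cnt=[]
--     for word in words:
--         if word[0] in vowels and word[-1]in vowels:
--             if len(cnt):
--                 cnt.append(1+cnt[-1])
--             else:
--                 cnt.append(1)
--         else:
--             if len(cnt):
--                 cnt.append(cnt[-1])
--             else:
--                 cnt.append(0)
--
--     cnt=[0]+cnt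
--     ans=[]
--     for l,r in queries:
--         ans.append(cnt[r+1]-cnt[l])
--
--     return ans
-- ===== SOURCE B (Python) =====
-- from typing import List
--
-- def vowelStrings(words: List[str], queries: List[List[int]]) -> List[int]:
--     vowels = {'a', 'e', 'i', 'u', 'o'}
--     pos = [i for i, w in enumerate(words) if w[0] in vowels and w[-1] in vowels]
--
--     def count_lt(x):
--         # number of stored positions strictly below x (binary search)
--         lo, hi = 0, len(pos)
--         while lo < hi:
--             mid = (lo + hi) // 2
--             if pos[mid] < x:
--                 lo = mid + 1
--             else:
--                 hi = mid
--         return lo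
--
--     return [count_lt(r + 1) - count_lt(l) for l, r in queries]
-- ===== Notes on version B (the rewrite author's own statement) =====
-- stated objective: alternative
-- what changed: Instead of maintaining a prefix-sum array over all words and answering each query by two array lookups, B stores only the sorted list of qualifying positions and answers each query by two hand-rolled binary searches (count of positions below r+1 minus count below l); it trades O(1) lookups for O(log n) searches over a smaller structure.
-- outside the precondition, e.g. on vowelStrings(['ae'], [[-1, 0]]): A returns [0], B returns [1]
import Mathlib
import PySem

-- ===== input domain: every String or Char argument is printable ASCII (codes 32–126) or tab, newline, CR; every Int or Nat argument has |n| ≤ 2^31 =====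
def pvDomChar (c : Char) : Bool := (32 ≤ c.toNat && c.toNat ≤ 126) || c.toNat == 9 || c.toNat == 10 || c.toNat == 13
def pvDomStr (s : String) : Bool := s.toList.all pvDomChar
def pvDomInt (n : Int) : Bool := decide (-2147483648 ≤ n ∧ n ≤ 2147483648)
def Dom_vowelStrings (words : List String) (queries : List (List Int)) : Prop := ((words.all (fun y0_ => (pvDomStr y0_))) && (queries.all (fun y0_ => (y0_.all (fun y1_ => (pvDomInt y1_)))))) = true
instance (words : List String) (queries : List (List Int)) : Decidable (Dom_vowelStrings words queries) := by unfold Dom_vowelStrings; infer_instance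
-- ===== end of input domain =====

-- B replaces A's length-(n+1) prefix-sum array by the sorted list of qualifying
-- positions, answering each inclusive query by two hand-rolled binary searches
-- (objective: alternative decomposition, similar cost).

-- ===== PORT A =====
-- step of A's first loop (builds the running prefix-count list cnt)
def pvStepA (cnt : List Int) (word : String) : List Int :=
  if PySem.Set.contains (PySem.Set.ofList ['a','e','i','u','o']) ((PySem.Str.pyGet? word 0).getD ' ')
      && PySem.Set.contains (PySem.Set.ofList ['a','e','i','u','o']) ((PySem.Str.pyGet? word (-1)).getD ' ')
  then (if cnt.length ≠ 0 then cnt ++ [1 + PySem.List.pyGetD cnt (-1) 0] else cnt ++ [1])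
  else (if cnt.length ≠ 0 then cnt ++ [PySem.List.pyGetD cnt (-1) 0] else cnt ++ [0])

def vowelStrings (words : List String) (queries : List (List Int)) : List Int :=
  let cnt : List Int := words.foldl pvStepA []
  let cnt : List Int := 0 :: cnt
  queries.foldl (fun ans q =>
    match q with
    | [l, r] => ans ++ [PySem.List.pyGetD cnt (r + 1) 0 - PySem.List.pyGetD cnt l 0]
    | _ => ans) []

-- ===== PORT B =====
-- the while-loop of B's count_lt helper: binary search for the number of stored positions < x
def pvCountLtFuel (pos : List Int) (x : Int) : Nat → Nat → Nat → Nat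
  | 0, lo, _ => lo
  | fuel + 1, lo, hi =>
    if lo < hi then
      let mid := (lo + hi) / 2
      if PySem.List.pyGetD pos (mid : Int) 0 < x then pvCountLtFuel pos x fuel (mid + 1) hi
      else pvCountLtFuel pos x fuel lo mid
    else lo

-- the loop runs while lo < hi; fuel hi - lo bounds its iterations (a totalization guard only)
def pvCountLt (pos : List Int) (x : Int) (lo hi : Nat) : Nat :=
  pvCountLtFuel pos x (hi - lo) lo hi

def vowelStrings_alt (words : List String) (queries : List (List Int)) : List Int :=
  let pos : List Int := (PySem.List.enumerate words 0).filterMap (fun p =>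
    if PySem.Set.contains (PySem.Set.ofList ['a','e','i','u','o']) ((PySem.Str.pyGet? p.2 0).getD ' ')
        && PySem.Set.contains (PySem.Set.ofList ['a','e','i','u','o']) ((PySem.Str.pyGet? p.2 (-1)).getD ' ')
    then some p.1 else none)
  queries.map (fun q =>
    match q with
    | l :: rest =>
      match rest with
      | r :: _ => (pvCountLt pos (r + 1) 0 pos.length : Int) - (pvCountLt pos l 0 pos.length : Int)
      | [] => 0
    | [] => 0)

-- ===== PRECONDITION & SPEC =====
-- Pre_ excludes inputs where A raises (an empty word, a query that is not a pair,
-- a query index outside the prefix array) and queries with l < 0 or r < -1, on which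
-- A still returns but its value comes from Python's accidental negative-index wraparound.
def Pre_vowelStrings (words : List String) (queries : List (List Int)) : Prop :=
  (∀ w ∈ words, w.toList ≠ []) ∧
  ∀ q ∈ queries, q.length = 2 ∧ 0 ≤ q.getD 0 0 ∧ q.getD 0 0 ≤ (words.length : Int) ∧
    -1 ≤ q.getD 1 0 ∧ q.getD 1 0 < (words.length : Int)
instance (words : List String) (queries : List (List Int)) : Decidable (Pre_vowelStrings words queries) := by unfold Pre_vowelStrings; infer_instance

def pvWitness_vowelStrings : List String × List (List Int) := (["ae", "xe"], [[0, 1], [1, 0]])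

def Spec_vowelStrings (words : List String) (queries : List (List Int)) (out : List Int) : Prop := out = vowelStrings_alt words queries
instance (words : List String) (queries : List (List Int)) (out : List Int) : Decidable (Spec_vowelStrings words queries out) := by unfold Spec_vowelStrings; infer_instance

-- ===== CLAIM (what is proved, stated in full; the proofs are below) =====
def Claim_equal_vowelStrings : Prop := ∀ (words : List String) (queries : List (List Int)), Dom_vowelStrings words queries → Pre_vowelStrings words queries → Spec_vowelStrings words queries (vowelStrings words queries)

-- ===== LEMMAS AND PROOFS =====

-- the qualifying predicate both programs test (starts and ends with a vowel)
def pvQual (w : String) : Bool :=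
  PySem.Set.contains (PySem.Set.ofList ['a','e','i','u','o']) ((PySem.Str.pyGet? w 0).getD ' ')
    && PySem.Set.contains (PySem.Set.ofList ['a','e','i','u','o']) ((PySem.Str.pyGet? w (-1)).getD ' ')

-- B's list of qualifying positions, named for the proofs
def pvPos (words : List String) : List Int :=
  (PySem.List.enumerate words 0).filterMap (fun p => if pvQual p.2 then some p.1 else none)

lemma pvFoldA (ws : List String) :
    ws.foldl pvStepA [] =
      (List.range ws.length).map (fun j => (((ws.take (j + 1)).countP pvQual : Nat) : Int)) := by
  induction ws using List.reverseRecOn with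
  | nil => simp
  | append_singleton ws w ih =>
    rw [List.foldl_append, List.foldl_cons, List.foldl_nil, ih]
    have hlen : (ws ++ [w]).length = ws.length + 1 := by simp
    rw [hlen, List.range_succ, List.map_append]
    have hmap : (List.range ws.length).map
          (fun j => ((((ws ++ [w]).take (j + 1)).countP pvQual : Nat) : Int)) =
        (List.range ws.length).map (fun j => (((ws.take (j + 1)).countP pvQual : Nat) : Int)) := by
      refine List.map_congr_left (fun j hj => ?_)
      rw [List.mem_range] at hj
      rw [List.take_append_of_le_length (by omega)]
    rw [hmap]
    have hlast : ((ws ++ [w]).take (ws.length + 1)) = ws ++ [w] := by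
      apply List.take_of_length_le; simp
    rw [List.map_cons, List.map_nil, hlast, List.countP_append]
    set prev := (List.range ws.length).map (fun j => (((ws.take (j + 1)).countP pvQual : Nat) : Int)) with hprev
    have hplen : prev.length = ws.length := by simp [hprev]
    have hlastprev : ws.length ≠ 0 → PySem.List.pyGetD prev (-1) 0 = ((ws.countP pvQual : Nat) : Int) := by
      intro hne
      obtain ⟨m, hm⟩ : ∃ m, ws.length = m + 1 := ⟨ws.length - 1, by omega⟩
      rw [hprev, hm, List.range_succ, List.map_append, List.map_cons, List.map_nil,
        PySem.List.pyGetD_neg_one_append_singleton]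
      rw [List.take_of_length_le (by omega)]
    rw [pvStepA]
    by_cases hq : pvQual w
    · rw [if_pos (by simpa [pvQual] using hq)]
      by_cases hne : ws.length = 0
      · rw [if_neg (by simp [hplen, hne])]
        have : ws = [] := List.eq_nil_of_length_eq_zero hne
        subst this
        simp [hq]
      · rw [if_pos (by simp [hplen, hne]), hlastprev hne]
        simp [hq]
        omega
    · rw [if_neg (by simpa [pvQual] using hq)]
      by_cases hne : ws.length = 0
      · rw [if_neg (by simp [hplen, hne])]
        have : ws = [] := List.eq_nil_of_length_eq_zero hne
        subst this
        simp [hq]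
      · rw [if_pos (by simp [hplen, hne]), hlastprev hne]
        simp [hq]

lemma pvIdxIff (pos : List Int) (hp : pos.Pairwise (· < ·)) (x : Int) :
    ∀ i (h : i < pos.length), (pos[i] < x ↔ i < pos.countP (fun y => decide (y < x))) := by
  induction pos with
  | nil => intro i h; simp at h
  | cons a tl ih =>
    rw [List.pairwise_cons] at hp
    obtain ⟨ha, htl⟩ := hp
    intro i h
    rw [List.countP_cons]
    by_cases hax : a < x
    · have hcnt : (if (decide (a < x)) = true then 1 else 0) = 1 := by simp [hax]
      rw [hcnt]
      cases i with
      | zero => simp only [List.getElem_cons_zero]; omega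
      | succ j =>
        simp only [List.getElem_cons_succ]
        have hj : j < tl.length := by simpa using h
        have hiff := ih htl j hj
        omega
    · have hz : tl.countP (fun y => decide (y < x)) = 0 := by
        rw [List.countP_eq_zero]
        intro y hy
        simp only [decide_eq_true_eq]
        have := ha y hy
        omega
      have hcnt : (if (decide (a < x)) = true then 1 else 0) = 0 := by simp [hax]
      rw [hcnt, hz]
      cases i with
      | zero => simp only [List.getElem_cons_zero]; omega
      | succ j =>
        simp only [List.getElem_cons_succ]
        have hj : j < tl.length := by simpa using h
        have hb := ha tl[j] (List.getElem_mem hj)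
        omega

lemma pvPosPairwise (ws : List String) (s : Int) :
    ((PySem.List.enumerate ws s).filterMap (fun p => if pvQual p.2 then some p.1 else none)).Pairwise (· < ·) := by
  have h := PySem.List.pairwise_lt_enumerate ws s
  refine List.Pairwise.filterMap _ ?_ h
  intro p q hpq a ha b hb
  simp only [ite_eq_iff] at ha hb
  rcases ha with ⟨_, ha⟩ | ⟨_, ha⟩ <;> rcases hb with ⟨_, hb⟩ | ⟨_, hb⟩ <;> simp_all

lemma pvPosCount (ws : List String) (s x : Int) :
    ((PySem.List.enumerate ws s).filterMap (fun p => if pvQual p.2 then some p.1 else none)).countP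
        (fun y => decide (y < x)) = (ws.take (x - s).toNat).countP pvQual := by
  induction ws generalizing s with
  | nil => simp [PySem.List.enumerate]
  | cons w tl ih =>
    rw [PySem.List.enumerate_cons, List.filterMap_cons]
    by_cases hq : pvQual w
    · simp only [hq, if_true, List.countP_cons]
      rw [ih (s+1)]
      by_cases hsx : s < x
      · have h1 : (x - s).toNat = (x - (s+1)).toNat + 1 := by omega
        rw [h1]
        simp [List.take_succ_cons, hq, hsx]
      · have h1 : (x - s).toNat = 0 := by omega
        have h2 : (x - (s+1)).toNat = 0 := by omega
        simp [h1, h2, hsx]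
    · simp only [hq, Bool.false_eq_true, if_false]
      rw [ih (s+1)]
      by_cases hsx : s < x
      · have h1 : (x - s).toNat = (x - (s+1)).toNat + 1 := by omega
        rw [h1]
        simp [List.take_succ_cons, hq]
      · have h1 : (x - s).toNat = 0 := by omega
        have h2 : (x - (s+1)).toNat = 0 := by omega
        simp [h1, h2]

lemma pvCountLtFuel_eq (pos : List Int) (x : Int) (L : Nat)
    (hIff : ∀ i (h : i < pos.length), (pos[i] < x ↔ i < L)) :
    ∀ (fuel lo hi : Nat), hi - lo ≤ fuel → lo ≤ L → L ≤ hi → hi ≤ pos.length →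
      pvCountLtFuel pos x fuel lo hi = L := by
  intro fuel
  induction fuel with
  | zero => intro lo hi hf hlo hhi hlen; simp [pvCountLtFuel]; omega
  | succ fuel ih =>
    intro lo hi hf hlo hhi hlen
    rw [pvCountLtFuel]
    by_cases hlt : lo < hi
    · rw [if_pos hlt]
      have hmid1 : lo ≤ (lo + hi) / 2 := by omega
      have hmid2 : (lo + hi) / 2 < hi := by omega
      have hm : (lo + hi) / 2 < pos.length := by omega
      have hget : PySem.List.pyGetD pos (((lo + hi) / 2 : Nat) : Int) 0 = pos[(lo + hi) / 2] := by
        rw [PySem.List.pyGetD_natCast, List.getD_eq_getElem _ _ hm]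
      by_cases hx : pos[(lo + hi) / 2] < x
      · rw [if_pos (by rw [hget]; exact hx)]
        exact ih _ _ (by omega) (by have := (hIff _ hm).mp hx; omega) hhi hlen
      · rw [if_neg (by rw [hget]; exact hx)]
        have hLe : L ≤ (lo + hi) / 2 := by
          by_contra hc
          exact hx ((hIff _ hm).mpr (by omega))
        exact ih _ _ (by omega) hlo hLe (by omega)
    · rw [if_neg hlt]; omega

lemma pvCountLt_eq (pos : List Int) (x : Int) (L lo hi : Nat)
    (hIff : ∀ i (h : i < pos.length), (pos[i] < x ↔ i < L))
    (hlo : lo ≤ L) (hhi : L ≤ hi) (hlen : hi ≤ pos.length) :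
    pvCountLt pos x lo hi = L :=
  pvCountLtFuel_eq pos x L hIff _ lo hi (le_refl _) hlo hhi hlen

lemma pvCrux (words : List String) (k : Int) (h0 : 0 ≤ k) (hk : k ≤ (words.length : Int)) :
    PySem.List.pyGetD ((0 : Int) :: words.foldl pvStepA []) k 0
      = ((pvCountLt (pvPos words) k 0 (pvPos words).length : Nat) : Int) := by
  have hc : (0 : Int) :: words.foldl pvStepA []
      = (List.range (words.length + 1)).map (fun j => (((words.take j).countP pvQual : Nat) : Int)) := by
    rw [pvFoldA, List.range_succ_eq_map, List.map_cons, List.map_map]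
    simp [Function.comp, Nat.succ_eq_add_one]
  rw [hc, PySem.List.pyGetD_eq_getElem _ _ h0 (by simp; omega)]
  rw [List.getElem_map, List.getElem_range]
  have hR : pvCountLt (pvPos words) k 0 (pvPos words).length
      = (pvPos words).countP (fun y => decide (y < k)) := by
    apply pvCountLt_eq
    · exact pvIdxIff _ (pvPosPairwise words 0) k
    · exact Nat.zero_le _
    · exact List.countP_le_length
    · exact le_refl _
  rw [hR]
  unfold pvPos
  rw [pvPosCount]
  norm_num

lemma pvMain (words : List String) (queries : List (List Int))
    (hpre : Pre_vowelStrings words queries) :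
    vowelStrings words queries = vowelStrings_alt words queries := by
  obtain ⟨-, hq⟩ := hpre
  show queries.foldl _ [] = _
  rw [vowelStrings_alt]
  have hposeq : ((PySem.List.enumerate words 0).filterMap (fun p =>
      if PySem.Set.contains (PySem.Set.ofList ['a','e','i','u','o']) ((PySem.Str.pyGet? p.2 0).getD ' ')
          && PySem.Set.contains (PySem.Set.ofList ['a','e','i','u','o']) ((PySem.Str.pyGet? p.2 (-1)).getD ' ')
      then some p.1 else none)) = pvPos words := rfl
  rw [hposeq]
  suffices h : ∀ (qs : List (List Int)) (acc : List Int),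
      (∀ q ∈ qs, q.length = 2 ∧ 0 ≤ q.getD 0 0 ∧ q.getD 0 0 ≤ (words.length : Int) ∧
        -1 ≤ q.getD 1 0 ∧ q.getD 1 0 < (words.length : Int)) →
      qs.foldl (fun ans q =>
        match q with
        | [l, r] => ans ++ [PySem.List.pyGetD ((0 : Int) :: words.foldl pvStepA []) (r + 1) 0
            - PySem.List.pyGetD ((0 : Int) :: words.foldl pvStepA []) l 0]
        | _ => ans) acc
      = acc ++ qs.map (fun q =>
        match q with
        | l :: rest =>
          match rest with
          | r :: _ => ((pvCountLt (pvPos words) (r + 1) 0 (pvPos words).length : Nat) : Int)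
              - ((pvCountLt (pvPos words) l 0 (pvPos words).length : Nat) : Int)
          | [] => 0
        | [] => 0) by
    simpa using h queries [] hq
  intro qs
  induction qs with
  | nil => intro acc _; simp
  | cons q qs ih =>
    intro acc hall
    obtain ⟨hlen2, hb⟩ := And.intro (hall q (by simp)).1 (hall q (by simp)).2
    obtain ⟨l, r, rfl⟩ : ∃ l r, q = [l, r] := by
      cases q with
      | nil => simp at hlen2
      | cons a t =>
        cases t with
        | nil => simp at hlen2
        | cons b t2 =>
          cases t2 with
          | nil => exact ⟨a, b, rfl⟩
          | cons c t3 => simp at hlen2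
    simp only [List.getD_cons_zero, List.getD_cons_succ] at hb
    rw [List.foldl_cons, List.map_cons]
    rw [ih _ (fun p hp => hall p (by simp [hp]))]
    rw [List.append_cons]
    have hv : PySem.List.pyGetD ((0 : Int) :: words.foldl pvStepA []) (r + 1) 0
        - PySem.List.pyGetD ((0 : Int) :: words.foldl pvStepA []) l 0
        = ((pvCountLt (pvPos words) (r + 1) 0 (pvPos words).length : Nat) : Int)
          - ((pvCountLt (pvPos words) l 0 (pvPos words).length : Nat) : Int) := by
      rw [pvCrux words (r + 1) (by omega) (by omega), pvCrux words l (by omega) (by omega)]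
    congr 1
    show acc ++ [PySem.List.pyGetD ((0 : Int) :: words.foldl pvStepA []) (r + 1) 0
        - PySem.List.pyGetD ((0 : Int) :: words.foldl pvStepA []) l 0]
      = acc ++ [((pvCountLt (pvPos words) (r + 1) 0 (pvPos words).length : Nat) : Int)
          - ((pvCountLt (pvPos words) l 0 (pvPos words).length : Nat) : Int)]
    rw [hv]

-- ===== VERDICT (by name: the statement is the Claim_ definition above) =====
theorem vowelStrings_spec : Claim_equal_vowelStrings := by
  intro words queries _hdom hpre
  unfold Spec_vowelStrings
  exact pvMain words queries hpre
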